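-- pv_equiv track=rewrite | github.com/pypi-data/pypi-mirror-273 | packages/selkie/selkie-0.25.1.tar.gz/selkie-0.25.1/src/selkie/pyx/formats.py | _records_to_blocks
-- ===== SOURCE A (Python) =====
-- def _records_to_blocks (records):
--     block = []
--     for r in records:
--         if r:
--            block.append(r)
--         elif block:
--             yield block
--             block = []
--     if block:
--         yield block
-- ===== SOURCE B (Python) =====
-- def _records_to_blocks(records):
--     recs = list(records)
--     n = len(recs)
--     bounds = [i for i, r in enumerate(recs) if not r]
--     for lo, hi in zip([-1] + bounds, bounds + [n]):
--         if hi - lo > 1: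
--             yield recs[lo + 1:hi]
-- ===== Notes on version B (the rewrite author's own statement) =====
-- stated objective: alternative
-- what changed: Two staged passes instead of A's single-pass buffer with flush-on-empty: B first computes the list of indices of empty records, then emits the slice between each pair of consecutive boundaries (with -1 and len as sentinels) when it is nonempty; B materializes the input list, so unlike A it is not lazy on infinite iterators.
import Mathlib
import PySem

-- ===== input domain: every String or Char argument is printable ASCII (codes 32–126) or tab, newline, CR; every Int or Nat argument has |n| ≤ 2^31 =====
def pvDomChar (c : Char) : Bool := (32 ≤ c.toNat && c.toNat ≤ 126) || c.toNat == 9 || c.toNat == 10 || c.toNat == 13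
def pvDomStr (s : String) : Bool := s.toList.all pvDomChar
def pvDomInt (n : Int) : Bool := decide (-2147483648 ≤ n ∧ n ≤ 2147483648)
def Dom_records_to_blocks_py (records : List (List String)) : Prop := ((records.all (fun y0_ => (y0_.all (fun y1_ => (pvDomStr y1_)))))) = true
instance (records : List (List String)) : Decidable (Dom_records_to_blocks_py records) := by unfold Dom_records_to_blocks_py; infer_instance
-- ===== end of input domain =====

-- B computes the indices of the empty records first and then emits the slice between each pair of
-- consecutive boundaries, instead of A's single-pass buffer with flush-on-empty; both are
-- generators, compared here as the list of yielded blocks (B materializes the input list).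

-- ===== PORT A =====
-- A's loop: buffer `block`, flush to the output on an empty record, final flush at the end.
def recordsGoA : List (List String) → List (List String) → List (List (List String)) → List (List (List String))
  | [], block, acc => if block.isEmpty then acc else acc ++ [block]
  | r :: rs, block, acc =>
      if !r.isEmpty then recordsGoA rs (block ++ [r]) acc
      else if !block.isEmpty then recordsGoA rs [] (acc ++ [block])
      else recordsGoA rs block acc

def records_to_blocks_py (records : List (List String)) : List (List (List String)) :=
  recordsGoA records [] []

-- ===== PORT B =====
-- bounds = [i for i, r in enumerate(recs) if not r]
def pvBounds (recs : List (List String)) : List Int :=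
  (PySem.List.enumerate recs 0).filterMap (fun p => if p.2.isEmpty then some p.1 else none)

-- the body of B's loop: for (lo, hi), yield recs[lo+1:hi] if hi - lo > 1
def pvStep (recs : List (List String)) (p : Int × Int) : Option (List (List String)) :=
  if p.2 - p.1 > 1 then some (PySem.List.slice recs (some (p.1 + 1)) (some p.2)) else none

def records_to_blocks_py_alt (records : List (List String)) : List (List (List String)) :=
  (List.zip ([-1] ++ pvBounds records) (pvBounds records ++ [(records.length : Int)])).filterMap
    (pvStep records)

-- ===== PRECONDITION & SPEC =====
def Spec_records_to_blocks_py (records : List (List String)) (out : List (List (List String))) : Prop := out = records_to_blocks_py_alt records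
instance (records : List (List String)) (out : List (List (List String))) : Decidable (Spec_records_to_blocks_py records out) := by unfold Spec_records_to_blocks_py; infer_instance

-- ===== CLAIM (what is proved, stated in full; the proofs are below) =====
def Claim_equal_records_to_blocks_py : Prop := ∀ (records : List (List String)), Dom_records_to_blocks_py records → Spec_records_to_blocks_py records (records_to_blocks_py records)

-- ===== LEMMAS AND PROOFS =====

lemma enum_shift {α : Type} (xs : List α) (s : Int) :
    PySem.List.enumerate xs (s + 1) = (PySem.List.enumerate xs s).map (fun p => (p.1 + 1, p.2)) := by
  induction xs generalizing s with
  | nil => simp [PySem.List.enumerate_nil]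
  | cons x xs ih =>
      rw [PySem.List.enumerate_cons, PySem.List.enumerate_cons, ih (s + 1)]
      simp

lemma pvBounds_nil : pvBounds [] = [] := by
  simp [pvBounds, PySem.List.enumerate_nil]

lemma pvBounds_cons (r : List String) (rs : List (List String)) :
    pvBounds (r :: rs) =
      (if r.isEmpty then [(0 : Int)] else []) ++ (pvBounds rs).map (· + 1) := by
  unfold pvBounds
  rw [PySem.List.enumerate_cons, List.filterMap_cons, show (0 : Int) + 1 = 0 + 1 from rfl,
    enum_shift, List.filterMap_map, List.map_filterMap]
  have h : ∀ p : Int × List String,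
      ((fun q : Int × List String => if q.2.isEmpty then some q.1 else none) ∘
        (fun q : Int × List String => (q.1 + 1, q.2))) p
      = (if p.2.isEmpty then some p.1 else none).map (· + 1) := by
    intro p; by_cases hp : p.2 = [] <;> simp [hp]
  rw [List.filterMap_congr (fun p _ => h p)]
  by_cases hr : r.isEmpty <;> simp [hr]

lemma pvBounds_nonneg (rs : List (List String)) : ∀ x ∈ pvBounds rs, 0 ≤ x := by
  induction rs with
  | nil => simp [pvBounds_nil]
  | cons r rs ih =>
      intro x hx
      rw [pvBounds_cons] at hx
      rcases List.mem_append.mp hx with h | h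
      · by_cases hr : r.isEmpty <;> simp [hr] at h; omega
      · obtain ⟨y, hy, rfl⟩ := List.mem_map.mp h
        have := ih y hy; omega

lemma slice_cons_shift {α : Type} (x : α) (xs : List α) (a b : Int) (ha : 0 ≤ a) (hb : 0 ≤ b) :
    PySem.List.slice (x :: xs) (some (a + 1)) (some (b + 1)) =
      PySem.List.slice xs (some a) (some b) := by
  obtain ⟨na, rfl⟩ := Int.eq_ofNat_of_zero_le ha
  obtain ⟨nb, rfl⟩ := Int.eq_ofNat_of_zero_le hb
  rw [show ((na : Int) + 1) = ((na + 1 : Nat) : Int) by push_cast; ring,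
      show ((nb : Int) + 1) = ((nb + 1 : Nat) : Int) by push_cast; ring,
      PySem.List.slice_natCast, PySem.List.slice_natCast]
  simp [Nat.succ_sub_succ]

lemma shift_pairs (x : List String) (recs : List (List String)) (pl : List (Int × Int))
    (h : ∀ p ∈ pl, -1 ≤ p.1 ∧ 0 ≤ p.2) :
    (pl.map (fun p => (p.1 + 1, p.2 + 1))).filterMap (pvStep (x :: recs)) =
      pl.filterMap (pvStep recs) := by
  rw [List.filterMap_map]
  refine List.filterMap_congr (fun p hp => ?_)
  obtain ⟨h1, h2⟩ := h p hp
  show pvStep (x :: recs) (p.1 + 1, p.2 + 1) = pvStep recs p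
  unfold pvStep
  by_cases hc : p.2 - p.1 > 1
  · rw [if_pos (by omega : (p.2 + 1) - (p.1 + 1) > 1), if_pos hc]
    exact congrArg some (slice_cons_shift x recs (p.1 + 1) p.2 (by omega) h2)
  · rw [if_neg (by omega : ¬ ((p.2 + 1) - (p.1 + 1) > 1)), if_neg hc]

lemma pairs_bound {l l' : List Int} (hl : ∀ y ∈ l, -1 ≤ y) (hl' : ∀ y ∈ l', 0 ≤ y) :
    ∀ p ∈ List.zip l l', -1 ≤ p.1 ∧ 0 ≤ p.2 := by
  intro p hp
  obtain ⟨h1, h2⟩ := List.of_mem_zip hp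
  exact ⟨hl _ h1, hl' _ h2⟩

lemma alt_nil : records_to_blocks_py_alt [] = [] := by decide

lemma alt_cons_empty (e : List String) (rs : List (List String)) (he : e.isEmpty = true) :
    records_to_blocks_py_alt (e :: rs) = records_to_blocks_py_alt rs := by
  unfold records_to_blocks_py_alt
  rw [pvBounds_cons]
  simp only [he, if_pos, List.length_cons]
  rw [show (((rs.length + 1 : Nat)) : Int) = (rs.length : Int) + 1 by push_cast; ring]
  rw [show ([(-1 : Int)] ++ ([0] ++ (pvBounds rs).map (· + 1))) =
        (-1) :: (0 :: (pvBounds rs).map (· + 1)) by simp]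
  rw [show (([0] ++ (pvBounds rs).map (· + 1)) ++ [(rs.length : Int) + 1]) =
        (0 : Int) :: ((pvBounds rs).map (· + 1) ++ [(rs.length : Int) + 1]) by simp]
  rw [List.zip_cons_cons, List.filterMap_cons]
  rw [show pvStep (e :: rs) (-1, 0) = none by simp [pvStep]]
  rw [show ((0 : Int) :: (pvBounds rs).map (· + 1)) =
        ((-1 :: pvBounds rs).map (fun y => y + 1)) by simp]
  rw [show ((pvBounds rs).map (· + 1) ++ [(rs.length : Int) + 1]) =
        ((pvBounds rs ++ [(rs.length : Int)]).map (fun y => y + 1)) by simp]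
  rw [List.zip_map, show Prod.map (fun y : Int => y + 1) (fun y : Int => y + 1) =
        (fun p : Int × Int => (p.1 + 1, p.2 + 1)) by funext p; simp [Prod.map]]
  rw [shift_pairs e rs _ (pairs_bound
        (by intro y hy; rcases List.mem_cons.mp hy with h | h
            · omega
            · have := pvBounds_nonneg rs y h; omega)
        (by intro y hy; rcases List.mem_append.mp hy with h | h
            · exact pvBounds_nonneg rs y h
            · simp at h; omega))]
  simp

lemma alt_singleton_nonempty (r : List String) (hr : r.isEmpty = false) :
    records_to_blocks_py_alt [r] = [[r]] := by
  unfold records_to_blocks_py_alt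
  rw [pvBounds_cons, pvBounds_nil]
  simp only [hr, List.map_nil, List.length_cons, List.length_nil]
  norm_num [List.zip_cons_cons, List.filterMap_cons, pvStep,
    PySem.List.slice_zero_start, PySem.List.slice_to]

lemma alt_cons_cons_nonempty_empty (r e : List String) (rs : List (List String))
    (hr : r.isEmpty = false) (he : e.isEmpty = true) :
    records_to_blocks_py_alt (r :: e :: rs) = [r] :: records_to_blocks_py_alt (e :: rs) := by
  have hbe : pvBounds (e :: rs) = 0 :: (pvBounds rs).map (· + 1) := by
    rw [pvBounds_cons]; simp [he]
  have hbr : pvBounds (r :: e :: rs) =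
      (1 : Int) :: ((pvBounds rs).map (· + 1)).map (· + 1) := by
    rw [pvBounds_cons, hbe]; simp [hr]
  -- right-hand side: drop the skipped (-1,0) pair of alt (e :: rs)
  have hrhs : records_to_blocks_py_alt (e :: rs) =
      (List.zip ((0 : Int) :: (pvBounds rs).map (· + 1))
        ((pvBounds rs).map (· + 1) ++ [(rs.length : Int) + 1])).filterMap (pvStep (e :: rs)) := by
    unfold records_to_blocks_py_alt
    rw [hbe]
    rw [show (((e :: rs).length : Nat) : Int) = (rs.length : Int) + 1 by push_cast [List.length_cons]; ring]
    rw [show ([(-1 : Int)] ++ (0 :: (pvBounds rs).map (· + 1))) =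
          (-1) :: (0 :: (pvBounds rs).map (· + 1)) by simp]
    rw [show ((0 :: (pvBounds rs).map (· + 1)) ++ [(rs.length : Int) + 1]) =
          (0 : Int) :: ((pvBounds rs).map (· + 1) ++ [(rs.length : Int) + 1]) by simp]
    rw [List.zip_cons_cons, List.filterMap_cons]
    rw [show pvStep (e :: rs) (-1, 0) = none by simp [pvStep]]
  have hlhs : records_to_blocks_py_alt (r :: e :: rs) =
      [r] :: (List.zip ((0 : Int) :: (pvBounds rs).map (· + 1))
        ((pvBounds rs).map (· + 1) ++ [(rs.length : Int) + 1])).filterMap (pvStep (e :: rs)) := by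
    unfold records_to_blocks_py_alt
    rw [hbr]
    rw [show (((r :: e :: rs).length : Nat) : Int) = (rs.length : Int) + 2 by
          push_cast [List.length_cons]; ring]
    rw [show ([(-1 : Int)] ++ ((1 : Int) :: ((pvBounds rs).map (· + 1)).map (· + 1))) =
          (-1) :: ((1 : Int) :: ((pvBounds rs).map (· + 1)).map (· + 1)) by simp]
    rw [show (((1 : Int) :: ((pvBounds rs).map (· + 1)).map (· + 1)) ++ [(rs.length : Int) + 2]) =
          (1 : Int) :: (((pvBounds rs).map (· + 1)).map (· + 1) ++ [(rs.length : Int) + 2]) by simp]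
    rw [List.zip_cons_cons, List.filterMap_cons]
    rw [show pvStep (r :: e :: rs) (-1, 1) = some [r] by
          simp only [pvStep]
          rw [if_pos (by omega)]
          rw [show ((-1 : Int) + 1) = 0 from rfl, PySem.List.slice_zero_start,
            PySem.List.slice_to _ _]
          · rfl
          · omega]
    rw [show ((1 : Int) :: ((pvBounds rs).map (· + 1)).map (· + 1)) =
          ((0 :: (pvBounds rs).map (· + 1)).map (fun y => y + 1)) by simp]
    rw [show (((pvBounds rs).map (· + 1)).map (· + 1) ++ [(rs.length : Int) + 2]) =
          (((pvBounds rs).map (· + 1) ++ [(rs.length : Int) + 1]).map (fun y => y + 1)) by simp; ring]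
    rw [List.zip_map, show Prod.map (fun y : Int => y + 1) (fun y : Int => y + 1) =
          (fun p : Int × Int => (p.1 + 1, p.2 + 1)) by funext p; simp [Prod.map]]
    rw [shift_pairs r (e :: rs) _ (pairs_bound
          (by intro y hy; rcases List.mem_cons.mp hy with h | h
              · omega
              · obtain ⟨z, hz, rfl⟩ := List.mem_map.mp h
                have := pvBounds_nonneg rs z hz; omega)
          (by intro y hy; rcases List.mem_append.mp hy with h | h
              · obtain ⟨z, hz, rfl⟩ := List.mem_map.mp h
                have := pvBounds_nonneg rs z hz; omega
              · simp at h; omega))]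
  rw [hlhs, hrhs]

lemma alt_cons_cons_nonempty_nonempty (r e : List String) (rs : List (List String))
    (hr : r.isEmpty = false) (he : e.isEmpty = false) :
    ∃ bl bs, records_to_blocks_py_alt (e :: rs) = bl :: bs ∧
      records_to_blocks_py_alt (r :: e :: rs) = (r :: bl) :: bs := by
  have hbe : pvBounds (e :: rs) = (pvBounds rs).map (· + 1) := by
    rw [pvBounds_cons]; simp [he]
  have hbr : pvBounds (r :: e :: rs) = ((pvBounds rs).map (· + 1)).map (· + 1) := by
    rw [pvBounds_cons, hbe]; simp [hr]
  cases hm : (pvBounds rs).map (· + 1) with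
  | nil =>
      refine ⟨e :: rs, [], ?_, ?_⟩
      · unfold records_to_blocks_py_alt
        rw [hbe, hm]
        rw [show (((e :: rs).length : Nat) : Int) = (rs.length : Int) + 1 by
              push_cast [List.length_cons]; ring]
        simp only [List.nil_append, List.append_nil, List.zip_cons_cons,
          List.zip_nil_right, List.filterMap_cons, List.filterMap_nil]
        rw [show pvStep (e :: rs) (-1, (rs.length : Int) + 1) = some (e :: rs) by
              simp only [pvStep]
              rw [if_pos (by omega)]
              rw [show ((-1 : Int) + 1) = 0 from rfl, PySem.List.slice_zero_start,
                PySem.List.slice_to _ _,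
                show ((rs.length : Int) + 1).toNat = rs.length + 1 by omega]
              · rw [List.take_of_length_le (by simp)]
              · omega]
      · unfold records_to_blocks_py_alt
        rw [hbr, hm]
        rw [show (((r :: e :: rs).length : Nat) : Int) = (rs.length : Int) + 2 by
              push_cast [List.length_cons]; ring]
        simp only [List.map_nil, List.nil_append, List.append_nil, List.zip_cons_cons,
          List.zip_nil_right, List.filterMap_cons, List.filterMap_nil]
        rw [show pvStep (r :: e :: rs) (-1, (rs.length : Int) + 2) = some (r :: e :: rs) by
              simp only [pvStep]
              rw [if_pos (by omega)]
              rw [show ((-1 : Int) + 1) = 0 from rfl, PySem.List.slice_zero_start,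
                PySem.List.slice_to _ _,
                show ((rs.length : Int) + 2).toNat = rs.length + 2 by omega]
              · rw [List.take_of_length_le (by simp)]
              · omega]
  | cons h t =>
      have hnn : ∀ y ∈ (h :: t : List Int), 1 ≤ y := by
        rw [← hm]
        intro y hy
        obtain ⟨z, hz, rfl⟩ := List.mem_map.mp hy
        have := pvBounds_nonneg rs z hz; omega
      have hh : 1 ≤ h := hnn h (List.mem_cons_self)
      refine ⟨(e :: rs).take h.toNat,
        (List.zip (h :: t) (t ++ [(rs.length : Int) + 1])).filterMap (pvStep (e :: rs)), ?_, ?_⟩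
      · unfold records_to_blocks_py_alt
        rw [hbe, hm]
        rw [show (((e :: rs).length : Nat) : Int) = (rs.length : Int) + 1 by
              push_cast [List.length_cons]; ring]
        rw [show ([(-1 : Int)] ++ (h :: t)) = (-1) :: (h :: t) by simp]
        rw [show ((h :: t) ++ [(rs.length : Int) + 1]) = h :: (t ++ [(rs.length : Int) + 1]) by simp]
        rw [List.zip_cons_cons, List.filterMap_cons]
        rw [show pvStep (e :: rs) (-1, h) = some ((e :: rs).take h.toNat) by
              simp only [pvStep]
              rw [if_pos (by omega)]
              rw [show (-1 : Int) + 1 = 0 from rfl]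
              rw [PySem.List.slice_zero_start, PySem.List.slice_to _ _]
              omega]
      · unfold records_to_blocks_py_alt
        rw [hbr, hm]
        rw [show (((r :: e :: rs).length : Nat) : Int) = (rs.length : Int) + 2 by
              push_cast [List.length_cons]; ring]
        rw [show ((h :: t : List Int).map (· + 1)) = (h + 1) :: t.map (· + 1) by simp]
        rw [show ([(-1 : Int)] ++ ((h + 1) :: t.map (· + 1))) =
              (-1) :: ((h + 1) :: t.map (· + 1)) by simp]
        rw [show (((h + 1) :: t.map (· + 1)) ++ [(rs.length : Int) + 2]) =
              (h + 1) :: (t.map (· + 1) ++ [(rs.length : Int) + 2]) by simp]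
        rw [List.zip_cons_cons, List.filterMap_cons]
        rw [show pvStep (r :: e :: rs) (-1, h + 1) = some (r :: (e :: rs).take h.toNat) by
              simp only [pvStep]
              rw [if_pos (by omega)]
              rw [show (-1 : Int) + 1 = 0 from rfl]
              rw [PySem.List.slice_zero_start, PySem.List.slice_to _ _]
              · rw [show (h + 1).toNat = h.toNat + 1 by omega]
                simp
              · omega]
        rw [show ((h + 1) :: t.map (· + 1)) = ((h :: t).map (fun y => y + 1)) by simp]
        rw [show (t.map (· + 1) ++ [(rs.length : Int) + 2]) =
              ((t ++ [(rs.length : Int) + 1]).map (fun y => y + 1)) by simp; ring]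
        rw [List.zip_map, show Prod.map (fun y : Int => y + 1) (fun y : Int => y + 1) =
              (fun p : Int × Int => (p.1 + 1, p.2 + 1)) by funext p; simp [Prod.map]]
        rw [shift_pairs r (e :: rs) _ (pairs_bound
              (by intro y hy; have := hnn y hy; omega)
              (by intro y hy; rcases List.mem_append.mp hy with hq | hq
                  · have := hnn y (List.mem_cons_of_mem h hq); omega
                  · simp at hq; omega))]

-- glue: what A's loop still owes the output when its buffer holds `block` and `rs` remains
def pvGlue (block : List (List String)) (rs : List (List String)) : List (List (List String)) :=
  if block = [] then records_to_blocks_py_alt rs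
  else match rs with
    | [] => [block]
    | e :: _ =>
        if e.isEmpty then block :: records_to_blocks_py_alt rs
        else match records_to_blocks_py_alt rs with
             | [] => [block]
             | bl :: bs => (block ++ bl) :: bs

lemma glue_snoc (block : List (List String)) (r : List String) (rs : List (List String))
    (hr : r.isEmpty = false) : pvGlue (block ++ [r]) rs = pvGlue block (r :: rs) := by
  cases rs with
  | nil =>
      cases block with
      | nil => simp [pvGlue, alt_singleton_nonempty r hr]
      | cons x bt => simp [pvGlue, hr, alt_singleton_nonempty r hr]
  | cons e rs' =>
      cases he : e.isEmpty with
      | true =>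
          have hA := alt_cons_cons_nonempty_empty r e rs' hr he
          cases block with
          | nil => simp [pvGlue, he, hA]
          | cons x bt => simp [pvGlue, hr, he, hA]
      | false =>
          obtain ⟨bl, bs, h1, h2⟩ := alt_cons_cons_nonempty_nonempty r e rs' hr he
          cases block with
          | nil => simp [pvGlue, he, h1, h2]
          | cons x bt => simp [pvGlue, hr, he, h1, h2]

lemma goA_glue (rs : List (List String)) : ∀ (block : List (List String))
    (acc : List (List (List String))), recordsGoA rs block acc = acc ++ pvGlue block rs := by
  induction rs with
  | nil =>
      intro block acc
      cases block with
      | nil => simp [recordsGoA, pvGlue, alt_nil]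
      | cons x bt => simp [recordsGoA, pvGlue]
  | cons r rs ih =>
      intro block acc
      cases hr : r.isEmpty with
      | true =>
          rw [recordsGoA]
          simp only [hr, Bool.not_true, Bool.false_eq_true, if_false]
          cases block with
          | nil =>
              simp only [List.isEmpty_nil, Bool.not_true, Bool.false_eq_true, if_false]
              rw [ih [] acc]
              simp [pvGlue, List.isEmpty_iff.mp hr, alt_cons_empty [] rs rfl]
          | cons x bt =>
              simp only [List.isEmpty_cons, Bool.not_false, if_true]
              rw [ih [] (acc ++ [x :: bt])]
              simp [pvGlue, List.isEmpty_iff.mp hr, alt_cons_empty [] rs rfl]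
      | false =>
          rw [recordsGoA]
          simp only [hr, Bool.not_false, if_true]
          rw [ih (block ++ [r]) acc, glue_snoc block r rs hr]

-- ===== VERDICT (by name: the statement is the Claim_ definition above) =====
theorem records_to_blocks_py_spec : Claim_equal_records_to_blocks_py := by
  intro records _
  show records_to_blocks_py records = records_to_blocks_py_alt records
  unfold records_to_blocks_py
  rw [goA_glue records [] []]
  simp [pvGlue]
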